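-- pv_equiv track=rewrite | github.com/AldoRodriguez28/saas-psicologia | apps/api/assets/fill-template.py | fill_repeating_section_plan
-- ===== SOURCE A (Python) =====
-- def escape_xml(value: str) -> str:
--     return (value
--             .replace('&', '&amp;')
--             .replace('<', '&lt;')
--             .replace('>', '&gt;')
--             .replace('"', '&quot;'))
--
-- def make_paragraph(text: str) -> str:
--     """Genera un párrafo Word con el texto dado."""
--     escaped = escape_xml(text)
--     return (
--         '<w:p>'
--         '<w:pPr><w:jc w:val="both"/></w:pPr>'
--         '<w:r>'
--         '<w:rPr><w:rStyle w:val="BaseChar"/></w:rPr>'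
--         f'<w:t xml:space="preserve">{escaped}</w:t>'
--         '</w:r>'
--         '</w:p>'
--     )
--
-- def fill_repeating_section_plan(xml: str, value: str) -> str:
--     """
--     Reemplaza el repeatingSection SDT del plan terapéutico con texto libre.
--     El SDT se identifica por <w15:repeatingSection/> dentro de su sdtPr.
--     """
--     # Encontrar el SDT con repeatingSection
--     rs_idx = xml.find('<w15:repeatingSection/>')
--     if rs_idx == -1:
--         return xml
--
--     # Retroceder al inicio del <w:sdt> padre
--     sdt_start = xml.rfind('<w:sdt>', 0, rs_idx)
--     if sdt_start == -1:
--         return xml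
--
--     # Encontrar el </w:sdt> balanceado
--     pos = sdt_start
--     depth = 0
--     sdt_end = -1
--     while pos < len(xml):
--         o = xml.find('<w:sdt>', pos)
--         c = xml.find('</w:sdt>', pos)
--         if o == -1:
--             o = len(xml)
--         if c == -1:
--             break
--         if o < c:
--             depth += 1
--             pos = o + 7
--         else:
--             depth -= 1
--             pos = c + 8
--             if depth == 0:
--                 sdt_end = pos
--                 break
--
--     if sdt_end == -1:
--         return xml
--
--     # Reemplazar todo el SDT con un párrafo de texto libre
--     new_paragraph = make_paragraph(value)
--     return xml[:sdt_start] + new_paragraph + xml[sdt_end:]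
-- ===== SOURCE B (Python) =====
-- def escape_xml(value: str) -> str:
--     return (value
--             .replace('&', '&amp;')
--             .replace('<', '&lt;')
--             .replace('>', '&gt;')
--             .replace('"', '&quot;'))
--
-- def make_paragraph(text: str) -> str:
--     escaped = escape_xml(text)
--     return (
--         '<w:p>'
--         '<w:pPr><w:jc w:val="both"/></w:pPr>'
--         '<w:r>'
--         '<w:rPr><w:rStyle w:val="BaseChar"/></w:rPr>'
--         f'<w:t xml:space="preserve">{escaped}</w:t>'
--         '</w:r>'
--         '</w:p>'
--     )
--
-- def fill_repeating_section_plan(xml: str, value: str) -> str: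
--     rs_idx = xml.find('<w15:repeatingSection/>')
--     if rs_idx == -1:
--         return xml
--     sdt_start = xml.rfind('<w:sdt>', 0, rs_idx)
--     if sdt_start == -1:
--         return xml
--     # Pre-build the ordered index of all SDT tag events from sdt_start on,
--     # then a single depth-counting pass over that list.
--     events = [(i, xml.startswith('<w:sdt>', i))
--               for i in range(sdt_start, len(xml))
--               if xml.startswith('<w:sdt>', i) or xml.startswith('</w:sdt>', i)]
--     sdt_end = -1
--     depth = 0
--     for i, is_open in events:
--         if is_open:
--             depth += 1
--         else:
--             depth -= 1
--             if depth == 0: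
--                 sdt_end = i + 8
--                 break
--     if sdt_end == -1:
--         return xml
--     return xml[:sdt_start] + make_paragraph(value) + xml[sdt_end:]
-- ===== Notes on version B (the rewrite author's own statement) =====
-- stated objective: alternative
-- what changed: A's cursor loop that re-runs two str.find calls per step and jumps the cursor past each tag is replaced by pre-building the ordered index of all <w:sdt>/</w:sdt> tag events from sdt_start on, then a single depth-counting pass over that event list.
import Mathlib
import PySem

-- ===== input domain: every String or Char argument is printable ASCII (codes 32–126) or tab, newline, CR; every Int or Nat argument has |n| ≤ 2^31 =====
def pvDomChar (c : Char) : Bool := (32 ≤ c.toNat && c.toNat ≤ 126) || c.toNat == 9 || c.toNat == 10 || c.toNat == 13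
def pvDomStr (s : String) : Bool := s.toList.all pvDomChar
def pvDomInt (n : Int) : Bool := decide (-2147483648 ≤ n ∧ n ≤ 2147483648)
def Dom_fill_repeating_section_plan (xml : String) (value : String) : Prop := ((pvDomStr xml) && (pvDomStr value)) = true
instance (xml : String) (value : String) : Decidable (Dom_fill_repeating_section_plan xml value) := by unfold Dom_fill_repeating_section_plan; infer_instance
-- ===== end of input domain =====

-- B replaces A's cursor-and-double-find balancing loop by a pre-built ordered index of all
-- SDT tag events followed by a single depth-counting pass over that list (objective: alternative).

-- shared helpers (identical in both Pythons): escape_xml / make_paragraph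
def escape_xml (value : String) : String :=
  PySem.Str.replace
    (PySem.Str.replace
      (PySem.Str.replace
        (PySem.Str.replace value "&" "&amp;")
        "<" "&lt;")
      ">" "&gt;")
    "\"" "&quot;"

def make_paragraph (text : String) : String :=
  "<w:p><w:pPr><w:jc w:val=\"both\"/></w:pPr><w:r><w:rPr><w:rStyle w:val=\"BaseChar\"/></w:rPr><w:t xml:space=\"preserve\">"
    ++ escape_xml text
    ++ "</w:t></w:r></w:p>"

def pvOpenT : List Char := "<w:sdt>".toList
def pvCloseT : List Char := "</w:sdt>".toList

-- ===== PORT A =====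
-- A's while loop: pos cursor, two finds per step; fuel only makes the recursion total
-- (one step consumes ≥ 7 characters, so cs.length + 1 fuel is never exhausted).
def fillA_loop (cs : List Char) (fuel : Nat) (pos : Nat) (depth : Int) : Int :=
  match fuel with
  | 0 => -1
  | fuel + 1 =>
    if pos < cs.length then
      let o := PySem.Chars.findFrom cs pvOpenT (pos : Int)
      let c := PySem.Chars.findFrom cs pvCloseT (pos : Int)
      let o2 : Int := if o = -1 then (cs.length : Int) else o
      if c = -1 then -1
      else if o2 < c then fillA_loop cs fuel (o2.toNat + 7) (depth + 1)
      else if depth - 1 = 0 then c + 8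
      else fillA_loop cs fuel (c.toNat + 8) (depth - 1)
    else -1

def fill_repeating_section_plan (xml : String) (value : String) : String :=
  let cs := xml.toList
  let rs_idx := PySem.Chars.find cs "<w15:repeatingSection/>".toList
  if rs_idx = -1 then xml
  else
    let sdt_start := PySem.Chars.rfindFrom cs pvOpenT 0 (some rs_idx)
    if sdt_start = -1 then xml
    else
      let sdt_end := fillA_loop cs (cs.length + 1) sdt_start.toNat 0
      if sdt_end = -1 then xml
      else
        String.ofList (PySem.Chars.slice cs none (some sdt_start)
          ++ (make_paragraph value).toList
          ++ PySem.Chars.slice cs (some sdt_end) none)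

-- ===== PORT B =====
-- xml.startswith(tag, i) for 0 ≤ i is exactly: tag is a prefix of cs.drop i
def pvEvPair (cs : List Char) (i : Nat) : Option (Nat × Bool) :=
  if PySem.Chars.startswith (cs.drop i) pvOpenT then some (i, true)
  else if PySem.Chars.startswith (cs.drop i) pvCloseT then some (i, false)
  else none

-- the comprehension over range(sdt_start, len(xml)): the ordered SDT-tag event index
def pvEvents (cs : List Char) (pos : Nat) : List (Nat × Bool) :=
  (List.range' pos (cs.length - pos)).filterMap (pvEvPair cs)

-- the single depth-counting pass (for-loop with break; -1 = never balanced)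
def fillB_scan : List (Nat × Bool) → Int → Int
  | [], _ => -1
  | (i, isOpen) :: rest, depth =>
    if isOpen then fillB_scan rest (depth + 1)
    else if depth - 1 = 0 then (i : Int) + 8
    else fillB_scan rest (depth - 1)

def fill_repeating_section_plan_alt (xml : String) (value : String) : String :=
  let cs := xml.toList
  let rs_idx := PySem.Chars.find cs "<w15:repeatingSection/>".toList
  if rs_idx = -1 then xml
  else
    let sdt_start := PySem.Chars.rfindFrom cs pvOpenT 0 (some rs_idx)
    if sdt_start = -1 then xml
    else
      let sdt_end := fillB_scan (pvEvents cs sdt_start.toNat) 0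
      if sdt_end = -1 then xml
      else
        String.ofList (PySem.Chars.slice cs none (some sdt_start)
          ++ (make_paragraph value).toList
          ++ PySem.Chars.slice cs (some sdt_end) none)

-- ===== PRECONDITION & SPEC =====
def Spec_fill_repeating_section_plan (xml : String) (value : String) (out : String) : Prop := out = fill_repeating_section_plan_alt xml value
instance (xml : String) (value : String) (out : String) : Decidable (Spec_fill_repeating_section_plan xml value out) := by unfold Spec_fill_repeating_section_plan; infer_instance

-- ===== CLAIM (what is proved, stated in full; the proofs are below) =====
def Claim_equal_fill_repeating_section_plan : Prop := ∀ (xml : String) (value : String), Dom_fill_repeating_section_plan xml value → Spec_fill_repeating_section_plan xml value (fill_repeating_section_plan xml value)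

-- ===== LEMMAS AND PROOFS =====

theorem prefix_head {α : Type} {a : α} {l xs : List α} (h : (a :: l) <+: xs) :
    xs.head? = some a := by
  obtain ⟨r, hr⟩ := h
  simp [← hr]

-- no SDT tag starts strictly inside an SDT tag occurrence (the only '<' of a tag is its head)
theorem evPair_none_inside (cs : List Char) (j : Nat) (t : List Char)
    (ht : t <+: cs.drop j) (k : Nat) (_h1 : 1 ≤ k) (h2 : k < t.length)
    (hk : t[k] ≠ '<') : pvEvPair cs (j + k) = none := by
  obtain ⟨r, hr⟩ := ht
  have hdrop : cs.drop (j + k) = t.drop k ++ r := by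
    have : cs.drop (j + k) = (cs.drop j).drop k := by rw [List.drop_drop]
    rw [this, ← hr, List.drop_append]
    have : k - t.length = 0 := by omega
    simp [this]
  have hhead : (cs.drop (j + k)).head? = some t[k] := by
    rw [hdrop, List.drop_eq_getElem_cons h2]
    simp
  unfold pvEvPair
  rw [if_neg, if_neg]
  · intro hcl
    rw [PySem.Chars.startswith_iff] at hcl
    have : (cs.drop (j + k)).head? = some '<' := by
      have : pvCloseT = '<' :: "/w:sdt>".toList := by decide
      exact prefix_head (this ▸ hcl)
    rw [hhead] at this; exact hk (by injection this)
  · intro hop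
    rw [PySem.Chars.startswith_iff] at hop
    have : (cs.drop (j + k)).head? = some '<' := by
      have : pvOpenT = '<' :: "w:sdt>".toList := by decide
      exact prefix_head (this ▸ hop)
    rw [hhead] at this; exact hk (by injection this)


theorem evPair_none_in_close (cs : List Char) (cpos : Nat)
    (hcpre : pvCloseT <+: cs.drop cpos) :
    ∀ i, cpos + 1 ≤ i → i < cpos + 8 → pvEvPair cs i = none := by
  intro i hi1 hi2
  have h8 : pvCloseT.length = 8 := by decide
  have hk2 : i - cpos < pvCloseT.length := by omega
  have hd : ∀ k : Nat, k < 8 → 1 ≤ k → pvCloseT.getD k ' ' ≠ '<' := by decide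
  have hker : pvCloseT[i - cpos]'hk2 ≠ '<' := by
    have := hd (i - cpos) (by omega) (by omega)
    rwa [List.getD_eq_getElem _ _ hk2] at this
  rw [show i = cpos + (i - cpos) from by omega]
  exact evPair_none_inside cs cpos pvCloseT hcpre (i - cpos) (by omega) hk2 hker

theorem evPair_none_in_open (cs : List Char) (opos : Nat)
    (hopre : pvOpenT <+: cs.drop opos) :
    ∀ i, opos + 1 ≤ i → i < opos + 7 → pvEvPair cs i = none := by
  intro i hi1 hi2
  have h7 : pvOpenT.length = 7 := by decide
  have hk2 : i - opos < pvOpenT.length := by omega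
  have hd : ∀ k : Nat, k < 7 → 1 ≤ k → pvOpenT.getD k ' ' ≠ '<' := by decide
  have hker : pvOpenT[i - opos]'hk2 ≠ '<' := by
    have := hd (i - opos) (by omega) (by omega)
    rwa [List.getD_eq_getElem _ _ hk2] at this
  rw [show i = opos + (i - opos) from by omega]
  exact evPair_none_inside cs opos pvOpenT hopre (i - opos) (by omega) hk2 hker

theorem events_empty (cs : List Char) (pos : Nat) (h : cs.length ≤ pos) :
    pvEvents cs pos = [] := by
  unfold pvEvents
  have : cs.length - pos = 0 := by omega
  simp [this]

theorem events_skip (cs : List Char) (a b : Nat) (hab : a ≤ b) (hb : b ≤ cs.length)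
    (hnone : ∀ i, a ≤ i → i < b → pvEvPair cs i = none) :
    pvEvents cs a = pvEvents cs b := by
  unfold pvEvents
  have hsplit : List.range' a (b - a) ++ List.range' b (cs.length - b) =
      List.range' a (cs.length - a) := by
    have := @List.range'_append a (b - a) (cs.length - b) 1
    simpa [Nat.one_mul, show a + (b - a) = b by omega,
      show (b - a) + (cs.length - b) = cs.length - a by omega] using this
  rw [← hsplit, List.filterMap_append]
  have : (List.range' a (b - a)).filterMap (pvEvPair cs) = [] := by
    rw [List.filterMap_eq_nil_iff]
    intro i hi
    rw [List.mem_range'_1] at hi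
    exact hnone i hi.1 (by omega)
  rw [this, List.nil_append]

theorem events_cons (cs : List Char) (pos j : Nat) (b : Bool) (hpj : pos ≤ j)
    (hj : j < cs.length)
    (hnone : ∀ i, pos ≤ i → i < j → pvEvPair cs i = none)
    (hev : pvEvPair cs j = some (j, b)) :
    pvEvents cs pos = (j, b) :: pvEvents cs (j + 1) := by
  rw [events_skip cs pos j hpj (by omega) hnone]
  unfold pvEvents
  have : cs.length - j = (cs.length - (j + 1)) + 1 := by omega
  rw [this, List.range'_succ, List.filterMap_cons, hev]

-- all events are opens → the depth pass never balances
theorem scan_all_open (l : List (Nat × Bool)) (h : ∀ p ∈ l, p.2 = true) :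
    ∀ depth, fillB_scan l depth = -1 := by
  induction l with
  | nil => intro depth; rfl
  | cons p rest ih =>
    intro depth
    obtain ⟨i, isOpen⟩ := p
    have : isOpen = true := h (i, isOpen) (by simp)
    rw [this]
    show fillB_scan rest (depth + 1) = -1
    exact ih (fun q hq => h q (by simp [hq])) _

-- a prefix occurrence at i ≥ pos means the tag is an infix of cs.drop pos
theorem infix_of_prefix_ge (cs t : List Char) (pos i : Nat) (hpi : pos ≤ i)
    (h : t <+: cs.drop i) : t <:+: cs.drop pos := by
  rw [← PySem.Chars.isIn_iff_infix, ← PySem.Chars.exists_prefix_drop_iff_isIn]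
  exact ⟨i - pos, by rwa [List.drop_drop, show pos + (i - pos) = i by omega]⟩

-- open and close tags cannot both start at the same position
theorem not_open_close (cs : List Char) (j : Nat) (ho : pvOpenT <+: cs.drop j)
    (hc : pvCloseT <+: cs.drop j) : False := by
  obtain ⟨r1, hr1⟩ := ho
  obtain ⟨r2, hr2⟩ := hc
  rw [← hr2] at hr1
  have ho' : pvOpenT = '<' :: 'w' :: ":sdt>".toList := by decide
  have hc' : pvCloseT = '<' :: '/' :: "w:sdt>".toList := by decide
  rw [ho', hc'] at hr1
  simp at hr1

-- ===== MAIN LEMMA: A's cursor loop = B's pass over the event index =====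
theorem loop_eq (cs : List Char) : ∀ (fuel pos : Nat) (depth : Int),
    cs.length - pos ≤ fuel →
    fillA_loop cs fuel pos depth = fillB_scan (pvEvents cs pos) depth := by
  intro fuel
  induction fuel with
  | zero =>
    intro pos depth h
    rw [events_empty cs pos (by omega)]
    rfl
  | succ n ih =>
    intro pos depth hf
    by_cases hp : pos < cs.length
    · have hplen : pos ≤ cs.length := by omega
      rw [show fillA_loop cs (n + 1) pos depth =
        (if pos < cs.length then
          let o := PySem.Chars.findFrom cs pvOpenT (pos : Int)
          let c := PySem.Chars.findFrom cs pvCloseT (pos : Int)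
          let o2 : Int := if o = -1 then (cs.length : Int) else o
          if c = -1 then -1
          else if o2 < c then fillA_loop cs n (o2.toNat + 7) (depth + 1)
          else if depth - 1 = 0 then c + 8
          else fillA_loop cs n (c.toNat + 8) (depth - 1)
        else -1) from rfl]
      rw [if_pos hp]
      set o := PySem.Chars.findFrom cs pvOpenT (pos : Int) with ho_def
      set c := PySem.Chars.findFrom cs pvCloseT (pos : Int) with hc_def
      by_cases hc1 : c = -1
      · -- no close tag from pos on: A breaks with -1; B's events are all opens
        rw [if_pos hc1]
        have hnoc : ¬ pvCloseT <:+: cs.drop pos :=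
          (PySem.Chars.findFrom_natCast_eq_neg_one_iff cs pvCloseT pos hplen).mp hc1
        have : ∀ p ∈ pvEvents cs pos, p.2 = true := by
          intro p hp'
          obtain ⟨i, hi, hev⟩ := List.mem_filterMap.mp hp'
          rw [List.mem_range'_1] at hi
          unfold pvEvPair at hev
          by_cases h1 : PySem.Chars.startswith (List.drop i cs) pvOpenT
          · rw [if_pos h1] at hev; injection hev with h'; rw [← h']
          · rw [if_neg h1] at hev
            by_cases h2 : PySem.Chars.startswith (List.drop i cs) pvCloseT
            · exact absurd (infix_of_prefix_ge cs pvCloseT pos i hi.1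
                ((PySem.Chars.startswith_iff _ _).mp h2)) hnoc
            · rw [if_neg h2] at hev; cases hev
        rw [scan_all_open _ this depth]
      · -- c is the first close at or after pos
        rw [if_neg hc1]
        obtain ⟨hcge, hcpre, hcmin⟩ :=
          PySem.Chars.findFrom_natCast_spec cs pvCloseT pos hplen hc1
        have hclen : c.toNat + 8 ≤ cs.length := by
          have := hcpre.length_le
          have h8 : pvCloseT.length = 8 := by decide
          rw [h8, List.length_drop] at this
          omega
        by_cases ho1 : o = -1
        · -- no open from pos on: o2 = len ≥ c, so A takes the close branch
          have hnoo : ¬ pvOpenT <:+: cs.drop pos :=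
            (PySem.Chars.findFrom_natCast_eq_neg_one_iff cs pvOpenT pos hplen).mp ho1
          have hnoo' : ∀ i, pos ≤ i → ¬ pvOpenT <+: cs.drop i := fun i hi h =>
            hnoo (infix_of_prefix_ge cs pvOpenT pos i hi h)
          rw [if_pos ho1, if_neg (by omega)]
          -- events pos = (c.toNat, false) :: events (c.toNat + 8)
          have hevc : pvEvPair cs c.toNat = some (c.toNat, false) := by
            unfold pvEvPair
            rw [if_neg, if_pos ((PySem.Chars.startswith_iff _ _).mpr hcpre)]
            simp only [PySem.Chars.startswith_iff]
            exact hnoo' c.toNat (by omega)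
          have hnone : ∀ i, pos ≤ i → i < c.toNat → pvEvPair cs i = none := by
            intro i hi hic
            unfold pvEvPair
            rw [if_neg, if_neg]
            · simp only [PySem.Chars.startswith_iff]; exact hcmin i hi hic
            · simp only [PySem.Chars.startswith_iff]; exact hnoo' i hi
          have hskip : pvEvents cs (c.toNat + 1) = pvEvents cs (c.toNat + 8) := by
            exact events_skip cs _ _ (by omega) hclen (evPair_none_in_close cs c.toNat hcpre)
          rw [events_cons cs pos c.toNat false (by omega)
            (by omega) hnone hevc, hskip]
          show _ = if depth - 1 = 0 then (c.toNat : Int) + 8 else fillB_scan (pvEvents cs (c.toNat + 8)) (depth - 1)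
          by_cases hd : depth - 1 = 0
          · rw [if_pos hd, if_pos hd]; omega
          · rw [if_neg hd, if_neg hd]
            exact ih (c.toNat + 8) (depth - 1) (by omega)
        · -- both tags occur from pos on
          obtain ⟨hoge, hopre, homin⟩ :=
            PySem.Chars.findFrom_natCast_spec cs pvOpenT pos hplen ho1
          have holen : o.toNat + 7 ≤ cs.length := by
            have := hopre.length_le
            have h7 : pvOpenT.length = 7 := by decide
            rw [h7, List.length_drop] at this
            omega
          have hone : o ≠ c := by
            intro h
            exact not_open_close cs o.toNat hopre (h ▸ hcpre)
          rw [if_neg ho1]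
          by_cases hoc : o < c
          · -- open first
            rw [if_pos hoc]
            have hevo : pvEvPair cs o.toNat = some (o.toNat, true) := by
              unfold pvEvPair
              rw [if_pos ((PySem.Chars.startswith_iff _ _).mpr hopre)]
            have hnone : ∀ i, pos ≤ i → i < o.toNat → pvEvPair cs i = none := by
              intro i hi hio
              unfold pvEvPair
              rw [if_neg, if_neg]
              · simp only [PySem.Chars.startswith_iff]
                exact hcmin i hi (by omega)
              · simp only [PySem.Chars.startswith_iff]; exact homin i hi hio
            have hskip : pvEvents cs (o.toNat + 1) = pvEvents cs (o.toNat + 7) := by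
              exact events_skip cs _ _ (by omega) holen (evPair_none_in_open cs o.toNat hopre)
            rw [events_cons cs pos o.toNat true (by omega) (by omega) hnone hevo,
              hskip]
            show fillA_loop cs n (o.toNat + 7) (depth + 1) =
              fillB_scan (pvEvents cs (o.toNat + 7)) (depth + 1)
            exact ih (o.toNat + 7) (depth + 1) (by omega)
          · -- close first (o > c since o ≠ c)
            rw [if_neg hoc]
            have hco : c.toNat < o.toNat := by omega
            have hevc : pvEvPair cs c.toNat = some (c.toNat, false) := by
              unfold pvEvPair
              rw [if_neg, if_pos ((PySem.Chars.startswith_iff _ _).mpr hcpre)]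
              simp only [PySem.Chars.startswith_iff]
              exact homin c.toNat (by omega) hco
            have hnone : ∀ i, pos ≤ i → i < c.toNat → pvEvPair cs i = none := by
              intro i hi hic
              unfold pvEvPair
              rw [if_neg, if_neg]
              · simp only [PySem.Chars.startswith_iff]; exact hcmin i hi hic
              · simp only [PySem.Chars.startswith_iff]
                exact homin i hi (by omega)
            have hskip : pvEvents cs (c.toNat + 1) = pvEvents cs (c.toNat + 8) := by
              exact events_skip cs _ _ (by omega) hclen (evPair_none_in_close cs c.toNat hcpre)
            rw [events_cons cs pos c.toNat false (by omega) (by omega) hnone hevc,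
              hskip]
            show _ = if depth - 1 = 0 then (c.toNat : Int) + 8 else fillB_scan (pvEvents cs (c.toNat + 8)) (depth - 1)
            by_cases hd : depth - 1 = 0
            · rw [if_pos hd, if_pos hd]; omega
            · rw [if_neg hd, if_neg hd]
              exact ih (c.toNat + 8) (depth - 1) (by omega)
    · rw [events_empty cs pos (by omega)]
      rw [show fillA_loop cs (n + 1) pos depth = (if pos < cs.length then _ else -1) from rfl,
        if_neg hp]
      rfl

theorem loop_eq' (cs : List Char) (pos : Nat) (depth : Int) :
    fillA_loop cs (cs.length + 1) pos depth = fillB_scan (pvEvents cs pos) depth :=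
  loop_eq cs (cs.length + 1) pos depth (by omega)

-- ===== VERDICT (by name: the statement is the Claim_ definition above) =====
theorem fill_repeating_section_plan_spec : Claim_equal_fill_repeating_section_plan := by
  intro xml value _
  unfold Spec_fill_repeating_section_plan
  unfold fill_repeating_section_plan fill_repeating_section_plan_alt
  simp only [loop_eq']
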